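-- pv_equiv track=rewrite | github.com/Yoonhyungseon/codeReview | pythonWorkspace/LeeBros/2_Simulation(34)/1_격자 안에서 완전탐색/2_행복한 수열의 개수.py | satisfy
-- ===== SOURCE A (Python) =====
-- def satisfy(arr, m):
--     compare = arr[0]
--     score = 0
--
--     for i in range(len(arr)):
--         if compare == arr[i]:
--             score += 1
--
--             if score >= m:
--                 return True
--
--         else:
--             compare = arr[i]
--             score = 1
--
--         if i == len(arr)-1:
--             if score >= m:
--                 return True
--             else:
--                 return False
-- ===== SOURCE B (Python) =====
-- def satisfy(arr, m):
--     if m <= 0: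
--         return True
--     i = 0
--     n = len(arr)
--     while n - i >= m:
--         j = i + 1
--         while j < i + m and arr[j] == arr[i]:
--             j += 1
--         if j == i + m:
--             return True
--         i = j
--     return False
-- ===== Notes on version B (the rewrite author's own statement) =====
-- stated objective: alternative
-- what changed: B replaces A's flat compare/score state machine (one loop, early returns, last-index check) by a two-level run scan: an inner loop walks each maximal run of equal elements capped at m and the outer loop jumps straight to the mismatch position.
import Mathlib
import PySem

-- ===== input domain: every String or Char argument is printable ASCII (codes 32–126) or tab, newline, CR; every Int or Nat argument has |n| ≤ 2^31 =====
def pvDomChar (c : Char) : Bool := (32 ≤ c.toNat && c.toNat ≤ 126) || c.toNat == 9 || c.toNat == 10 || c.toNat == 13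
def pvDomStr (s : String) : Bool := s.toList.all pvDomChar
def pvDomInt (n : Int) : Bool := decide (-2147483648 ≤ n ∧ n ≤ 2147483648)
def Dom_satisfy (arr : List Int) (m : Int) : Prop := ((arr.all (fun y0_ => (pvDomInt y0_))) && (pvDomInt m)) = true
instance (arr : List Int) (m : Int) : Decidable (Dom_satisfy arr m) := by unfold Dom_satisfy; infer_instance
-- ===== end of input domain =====

-- B replaces A's flat compare/score state machine by a two-level run scan: an inner loop walks
-- each maximal run (capped at m) and the outer loop jumps to the mismatch (objective: alternative).
-- A raises IndexError on empty arr; Pre_ excludes it.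


-- ===== PORT A =====
-- loop body of A: state (compare, score), early `return True` when score >= m,
-- and Python's `if i == len(arr)-1` test is `rest = []` here.
def satisfyGo (m compare score : Int) : List Int → Bool
  | [] => false
  | a :: rest =>
    if compare = a then
      let score' := score + 1
      if score' ≥ m then true
      else
        match rest with
        | [] => decide (score' ≥ m)
        | _ :: _ => satisfyGo m compare score' rest
    else
      match rest with
      | [] => decide ((1 : Int) ≥ m)
      | _ :: _ => satisfyGo m a 1 rest

def satisfy (arr : List Int) (m : Int) : Bool :=
  match arr with
  | [] => false  -- arr[0] raises IndexError in Python; excluded by Pre_satisfy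
  | a :: _ => satisfyGo m a 0 arr

-- ===== PORT B =====
-- inner while of Source B: `j = i + 1; while j < i + m and arr[j] == arr[i]: j += 1` — this
-- counts j - i - 1, the number of elements after position i equal to arr[i], capped at cap = m - 1;
-- the suffix list t here is arr[i+1:], so each arr[j] access is the successive head (exact).
def runCapped (a : Int) (cap : Nat) (t : List Int) : Nat :=
  match cap, t with
  | 0, _ => 0
  | _, [] => 0
  | c + 1, b :: t' => if b = a then runCapped a c t' + 1 else 0

-- outer while of Source B on the suffix l = arr[i:] (so `i = j` is dropping the scanned run);
-- `[]` fails the `n - i >= m` test since the loop is only entered with m ≥ 1.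
def satisfyAltLoop (m : Int) (l : List Int) : Bool :=
  match l with
  | [] => false
  | a :: t =>
    if ((a :: t).length : Int) < m then false
    else
      let k := runCapped a (m.toNat - 1) t
      if (k : Int) + 1 = m then true
      else satisfyAltLoop m (t.drop k)
termination_by l.length
decreasing_by simp only [List.length_drop, List.length_cons]; omega

def satisfy_alt (arr : List Int) (m : Int) : Bool :=
  if m ≤ 0 then true
  else satisfyAltLoop m arr

-- ===== PRECONDITION & SPEC =====
-- Pre_ excludes exactly the empty list, on which A raises IndexError at arr[0].
def Pre_satisfy (arr : List Int) (m : Int) : Prop := arr ≠ []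
instance (arr : List Int) (m : Int) : Decidable (Pre_satisfy arr m) := by unfold Pre_satisfy; infer_instance
def pvWitness_satisfy : List Int × Int := ([1, 1, 2], 2)

def Spec_satisfy (arr : List Int) (m : Int) (out : Bool) : Prop := out = satisfy_alt arr m
instance (arr : List Int) (m : Int) (out : Bool) : Decidable (Spec_satisfy arr m out) := by unfold Spec_satisfy; infer_instance

-- ===== CLAIM (what is proved, stated in full; the proofs are below) =====
def Claim_equal_satisfy : Prop := ∀ (arr : List Int) (m : Int), Dom_satisfy arr m → Pre_satisfy arr m → Spec_satisfy arr m (satisfy arr m)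

-- ===== LEMMAS AND PROOFS =====

-- the maximum value the running score reaches while scanning l with current compare c and score s
def scoreMax (c s : Int) : List Int → Int
  | [] => s
  | a :: rest =>
    let s' := if c = a then s + 1 else 1
    max s' (scoreMax a s' rest)

-- length of the initial run of a's in l
def runFrom (a : Int) : List Int → Nat
  | [] => 0
  | b :: l => if b = a then runFrom a l + 1 else 0

-- length of the longest run of equal consecutive elements
def maxRun : List Int → Nat
  | [] => 0
  | a :: l => max (runFrom a l + 1) (maxRun l)

theorem scoreMax_ge_one (c s : Int) (l : List Int) (hs : 0 ≤ s) (hl : l ≠ []) :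
    1 ≤ scoreMax c s l := by
  cases l with
  | nil => exact absurd rfl hl
  | cons a rest =>
    simp only [scoreMax]
    have : (1 : Int) ≤ if c = a then s + 1 else 1 := by split <;> omega
    exact le_trans this (le_max_left _ _)

theorem satisfyGo_eq_scoreMax (m : Int) : ∀ (l : List Int) (c s : Int), l ≠ [] → 0 ≤ s →
    satisfyGo m c s l = decide (scoreMax c s l ≥ m) := by
  intro l
  induction l with
  | nil => intro c s h; exact absurd rfl h
  | cons a rest ih =>
    intro c s _ hs
    simp only [satisfyGo, scoreMax]
    by_cases hca : c = a
    · simp only [if_pos hca]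
      by_cases hm : s + 1 ≥ m
      · have : max (s + 1) (scoreMax a (s + 1) rest) ≥ m :=
          le_trans hm (le_max_left _ _)
        simp [hm, this]
      · simp only [if_neg hm]
        cases rest with
        | nil => simp [scoreMax, hm]
        | cons b rest' =>
          subst hca
          rw [ih _ _ (by simp) (by omega)]
          have h1 : 1 ≤ scoreMax c (s + 1) (b :: rest') :=
            scoreMax_ge_one _ _ _ (by omega) (by simp)
          have : (max (s + 1) (scoreMax c (s + 1) (b :: rest')) ≥ m) ↔
              (scoreMax c (s + 1) (b :: rest') ≥ m) := by
            constructor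
            · intro h; rcases le_max_iff.mp h with h' | h' <;> omega
            · intro h; exact le_trans h (le_max_right _ _)
          simp [this]
    · simp only [if_neg hca]
      cases rest with
      | nil => simp [scoreMax]
      | cons b rest' =>
        rw [ih _ _ (by simp) (by omega)]
        have h1 : 1 ≤ scoreMax a 1 (b :: rest') :=
          scoreMax_ge_one _ _ _ (by omega) (by simp)
        simp [max_eq_right h1]

-- one-step unfolding of scoreMax on a cons
theorem scoreMax_cons (c s a : Int) (l : List Int) :
    scoreMax c s (a :: l) =
      max (if c = a then s + 1 else 1) (scoreMax a (if c = a then s + 1 else 1) l) := rfl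

-- characterisation of scoreMax on a nonempty list, for any current compare value
theorem scoreMax_char : ∀ (l : List Int) (a c s : Int), 0 ≤ s →
    scoreMax c s (a :: l) =
      if c = a then max (s + 1 + (runFrom a l : Int)) ((maxRun l : Int))
      else (maxRun (a :: l) : Int) := by
  intro l
  induction l with
  | nil =>
    intro a c s hs
    rw [scoreMax_cons]
    have h0 : ∀ x : Int, scoreMax a x [] = x := fun _ => rfl
    rw [h0]
    simp only [runFrom, maxRun]
    split <;> push_cast <;> omega
  | cons b l' ih =>
    intro a c s hs
    rw [scoreMax_cons]
    by_cases hca : c = a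
    · rw [if_pos hca, if_pos hca, ih b a (s + 1) (by omega)]
      by_cases hab : a = b
      · subst hab
        rw [if_pos rfl]
        simp only [runFrom, maxRun]
        push_cast
        omega
      · rw [if_neg hab]
        simp only [runFrom, if_neg (fun h : b = a => hab h.symm)]
        push_cast
        omega
    · rw [if_neg hca, if_neg hca, ih b a 1 (by omega)]
      by_cases hab : a = b
      · subst hab
        rw [if_pos rfl]
        simp only [runFrom, maxRun]
        push_cast
        omega
      · rw [if_neg hab]
        simp only [maxRun, runFrom, if_neg (fun h : b = a => hab h.symm)]
        push_cast
        omega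

theorem satisfy_eq_maxRun (a : Int) (l : List Int) (m : Int) :
    satisfy (a :: l) m = decide ((m : Int) ≤ (maxRun (a :: l) : Int)) := by
  show satisfyGo m a 0 (a :: l) = _
  rw [satisfyGo_eq_scoreMax m (a :: l) a 0 (by simp) le_rfl,
      scoreMax_char l a a 0 le_rfl, if_pos rfl, decide_eq_decide]
  simp only [ge_iff_le, maxRun]
  push_cast
  omega

theorem runFrom_le_length (a : Int) (l : List Int) : runFrom a l ≤ l.length := by
  induction l with
  | nil => simp [runFrom]
  | cons b l' ih => simp only [runFrom, List.length_cons]; split <;> omega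

theorem maxRun_le_length (l : List Int) : maxRun l ≤ l.length := by
  induction l with
  | nil => simp [maxRun]
  | cons a l' ih =>
    have := runFrom_le_length a l'
    simp only [maxRun, List.length_cons]
    omega

theorem runCapped_eq_min (a : Int) : ∀ (cap : Nat) (t : List Int),
    runCapped a cap t = min cap (runFrom a t) := by
  intro cap
  induction cap with
  | zero => intro t; simp [runCapped]
  | succ c ih =>
    intro t
    cases t with
    | nil => simp [runCapped, runFrom]
    | cons b t' =>
      by_cases hba : b = a
      · subst hba
        show (if b = b then runCapped b c t' + 1 else 0) = min (c + 1) (runFrom b (b :: t'))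
        rw [if_pos rfl, ih t']
        have hr : runFrom b (b :: t') = runFrom b t' + 1 := by simp [runFrom]
        rw [hr]
        omega
      · show (if b = a then runCapped a c t' + 1 else 0) = min (c + 1) (runFrom a (b :: t'))
        rw [if_neg hba]
        have hr : runFrom a (b :: t') = 0 := by simp [runFrom, hba]
        rw [hr]
        omega

-- dropping the initial run of a's from t does not lose any run of length > runFrom a t
theorem maxRun_run_drop : ∀ (t : List Int) (a : Int),
    maxRun t = max (runFrom a t) (maxRun (t.drop (runFrom a t))) := by
  intro t
  induction t with
  | nil => intro a; simp [runFrom, maxRun]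
  | cons b t' ih =>
    intro a
    by_cases hba : b = a
    · subst hba
      have hr : runFrom b (b :: t') = runFrom b t' + 1 := by simp [runFrom]
      rw [hr]
      simp only [maxRun, List.drop_succ_cons]
      rw [ih b]
      omega
    · have hr : runFrom a (b :: t') = 0 := by simp [runFrom, hba]
      rw [hr]
      simp

theorem satisfyAltLoop_eq_maxRun (m : Int) (hm : 1 ≤ m) :
    ∀ (l : List Int), satisfyAltLoop m l = decide ((m : Int) ≤ (maxRun l : Int)) := by
  intro l
  induction l using satisfyAltLoop.induct m with
  | case1 =>
    simp only [satisfyAltLoop, maxRun]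
    rw [eq_comm, decide_eq_false_iff_not]
    push_cast
    omega
  | case2 a t hlen =>
    rw [satisfyAltLoop, if_pos hlen]
    have h1 := maxRun_le_length (a :: t)
    simp only [List.length_cons] at hlen h1
    rw [eq_comm, decide_eq_false_iff_not]
    push_cast at hlen ⊢
    omega
  | case3 a t hlen k hk =>
    rw [satisfyAltLoop, if_neg hlen]
    simp only []
    rw [if_pos hk]
    have hkm := runCapped_eq_min a (m.toNat - 1) t
    have hyes : (m : Int) ≤ (maxRun (a :: t) : Int) := by
      simp only [maxRun]
      push_cast
      omega
    simp [hyes]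
  | case4 a t hlen k hk ih =>
    rw [satisfyAltLoop, if_neg hlen]
    simp only []
    rw [if_neg hk, ih, decide_eq_decide]
    have hkm := runCapped_eq_min a (m.toNat - 1) t
    have hkr : k = runFrom a t := by
      simp only [List.length_cons] at hlen
      push_cast at hlen
      omega
    have hdrop := maxRun_run_drop t a
    rw [← hkr] at hdrop
    simp only [maxRun, ← hkr]
    push_cast
    omega

theorem one_le_maxRun (a : Int) (l : List Int) : 1 ≤ maxRun (a :: l) := by
  simp only [maxRun]; omega

-- ===== VERDICT (by name: the statement is the Claim_ definition above) =====
theorem satisfy_spec : Claim_equal_satisfy := by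
  intro arr m _ hpre
  unfold Spec_satisfy
  cases arr with
  | nil => exact absurd rfl hpre
  | cons a l =>
    rw [satisfy_eq_maxRun]
    unfold satisfy_alt
    by_cases hm : m ≤ 0
    · have h1 := one_le_maxRun a l
      have h2 : (m : Int) ≤ (maxRun (a :: l) : Int) := by omega
      simp [hm, h2]
    · rw [if_neg hm, satisfyAltLoop_eq_maxRun m (by omega)]
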